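-- pv_equiv track=rewrite | github.com/541741106/IMPACT_HOI | tools/boundary_eval.py | _boundaries_from_segments
-- ===== SOURCE A (Python) =====
-- from typing import Any, Dict, Iterable, List, Optional, Tuple
--
-- def _boundaries_from_segments(segs: List[Tuple[int, int]]) -> List[int]:
--     if not segs:
--         return []
--     segs_sorted = sorted(segs, key=lambda x: (x[0], x[1]))
--     b = []
--     for idx, (s, _e) in enumerate(segs_sorted):
--         if idx == 0:
--             continue
--         if s > 0:
--             b.append(int(s))
--     return sorted(set(b))
-- ===== SOURCE B (Python) =====
-- from typing import List, Tuple
--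
--
-- def _boundaries_from_segments(segs: List[Tuple[int, int]]) -> List[int]:
--     if not segs:
--         return []
--     m = min(segs, key=lambda t: (t[0], t[1]))
--     out = set()
--     removed = False
--     for s, e in segs:
--         if not removed and (s, e) == m:
--             removed = True
--             continue
--         if s > 0:
--             out.add(int(s))
--     return sorted(out)
-- ===== Notes on version B (the rewrite author's own statement) =====
-- stated objective: alternative
-- what changed: B replaces A's full lexicographic sort of the segment list with a single linear min-pass and a flag-guarded scan that skips the first occurrence of the minimal segment while collecting the distinct positive starts.
import Mathlib
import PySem

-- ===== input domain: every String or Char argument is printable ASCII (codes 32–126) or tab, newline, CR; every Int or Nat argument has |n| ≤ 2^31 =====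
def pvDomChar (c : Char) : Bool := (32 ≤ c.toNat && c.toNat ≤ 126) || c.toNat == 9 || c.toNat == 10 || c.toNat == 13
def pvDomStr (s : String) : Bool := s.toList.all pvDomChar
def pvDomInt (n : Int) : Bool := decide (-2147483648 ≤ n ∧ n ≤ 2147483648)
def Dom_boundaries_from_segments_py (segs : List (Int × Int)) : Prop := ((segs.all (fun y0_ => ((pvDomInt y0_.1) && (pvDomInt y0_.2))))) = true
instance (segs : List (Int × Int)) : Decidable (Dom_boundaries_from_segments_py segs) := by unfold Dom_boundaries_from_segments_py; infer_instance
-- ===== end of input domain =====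

-- B finds the lexicographic minimum segment in one linear pass and skips its first
-- occurrence with a flag, instead of sorting the whole segment list and dropping index 0
-- (alternative decomposition; return value proved equal on all inputs).

-- ===== PORT A =====
def boundaries_from_segments_py (segs : List (Int × Int)) : List Int :=
  if segs = [] then []
  else
    let segs_sorted := PySem.List.sorted2 segs (fun x => x.1) (fun x => x.2)
    let b := (PySem.List.enumerate segs_sorted).foldl
      (fun b p => if p.1 == 0 then b else if p.2.1 > 0 then b ++ [p.2.1] else b)
      ([] : List Int)
    PySem.List.sorted (PySem.Set.ofList b) (fun x => x)

-- ===== PORT B =====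
def boundaries_from_segments_py_alt (segs : List (Int × Int)) : List Int :=
  if segs = [] then []
  else
    match PySem.List.min2? segs (fun t => t.1) (fun t => t.2) with
    | none => []
    | some m =>
      let st := segs.foldl
        (fun (st : Bool × PySem.Set Int) p =>
          if !st.1 && p == m then (true, st.2)
          else if p.1 > 0 then (st.1, PySem.Set.add st.2 p.1)
          else st)
        (false, PySem.Set.empty)
      PySem.List.sorted st.2 (fun x => x)

-- ===== PRECONDITION & SPEC =====
def Spec_boundaries_from_segments_py (segs : List (Int × Int)) (out : List Int) : Prop := out = boundaries_from_segments_py_alt segs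
instance (segs : List (Int × Int)) (out : List Int) : Decidable (Spec_boundaries_from_segments_py segs out) := by unfold Spec_boundaries_from_segments_py; infer_instance

-- ===== CLAIM (what is proved, stated in full; the proofs are below) =====
def Claim_equal_boundaries_from_segments_py : Prop := ∀ (segs : List (Int × Int)), Dom_boundaries_from_segments_py segs → Spec_boundaries_from_segments_py segs (boundaries_from_segments_py segs)

-- ===== LEMMAS AND PROOFS =====

-- the Boolean lexicographic test both ports' primitives use, named as the Lex order on pairs
theorem pvLexCond (a b : Int × Int) :
    (decide (a.1 < b.1) || (!decide (b.1 < a.1) && decide (a.2 < b.2))) = decide (toLex a < toLex b) := by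
  rw [Bool.eq_iff_iff]
  simp only [Bool.or_eq_true, Bool.and_eq_true, Bool.not_eq_eq_eq_not, Bool.not_true,
    decide_eq_true_eq, decide_eq_false_iff_not, Prod.Lex.toLex_lt_toLex]
  omega

-- A's loop over enumerate with start ≥ 1: the idx == 0 branch never fires
theorem pvEnumFold (xs : List (Int × Int)) (s : Int) (hs : 1 ≤ s) (acc : List Int) :
    (PySem.List.enumerate xs s).foldl
      (fun b p => if p.1 == 0 then b else if p.2.1 > 0 then b ++ [p.2.1] else b) acc
    = acc ++ (xs.filter (fun q => decide (q.1 > 0))).map (fun q => q.1) := by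
  induction xs generalizing s acc with
  | nil => simp [PySem.List.enumerate_nil]
  | cons x t ih =>
    rw [PySem.List.enumerate_cons]
    simp only [List.foldl_cons]
    have h0 : (s == (0 : Int)) = false := by simp; omega
    rw [h0]
    simp only [Bool.false_eq_true, if_false]
    by_cases hx : x.1 > 0
    · simp only [hx, if_true]
      rw [ih (s + 1) (by omega)]
      simp [hx]
    · simp only [hx, if_false]
      rw [ih (s + 1) (by omega)]
      simp [hx]

-- min2? of a nonempty list: it returns a lexicographic minimum
theorem pvMinFold (xs : List (Int × Int)) (m0 : Int × Int) :
    ∃ m, PySem.List.min2? (m0 :: xs) (fun t => t.1) (fun t => t.2) = some m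
      ∧ (m = m0 ∨ m ∈ xs) ∧ toLex m ≤ toLex m0 ∧ ∀ y ∈ xs, toLex m ≤ toLex y := by
  induction xs generalizing m0 with
  | nil => exact ⟨m0, rfl, Or.inl rfl, le_refl _, by simp⟩
  | cons x t ih =>
    simp only [PySem.List.min2?, List.foldl_cons] at ih ⊢
    rw [pvLexCond]
    by_cases hc : toLex x < toLex m0
    · rw [if_pos (by simp [hc])]
      obtain ⟨m, hm, hmem, hle, hall⟩ := ih x
      refine ⟨m, hm, ?_, ?_, ?_⟩
      · rcases hmem with h | h
        · exact Or.inr (by simp [h])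
        · exact Or.inr (by simp [h])
      · exact le_trans hle (le_of_lt hc)
      · intro y hy
        rcases List.mem_cons.mp hy with h | h
        · exact h ▸ hle
        · exact hall y h
    · rw [if_neg (by simp [hc])]
      obtain ⟨m, hm, hmem, hle, hall⟩ := ih m0
      refine ⟨m, hm, ?_, hle, ?_⟩
      · rcases hmem with h | h
        · exact Or.inl h
        · exact Or.inr (by simp [h])
      · intro y hy
        rcases List.mem_cons.mp hy with h | h
        · exact h ▸ le_trans hle (not_lt.mp hc)
        · exact hall y h

-- sorted2 with the two projections is pairwise-ordered for the Lex order
theorem pvSorted2Pairwise (xs : List (Int × Int)) :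
    (PySem.List.sorted2 xs (fun x => x.1) (fun x => x.2)).Pairwise
      (fun a b => toLex a ≤ toLex b) := by
  have hbe : (fun (a b : Int × Int) => decide (a.1 < b.1) || (!decide (b.1 < a.1) && decide (a.2 < b.2)))
      = (fun a b => decide ((toLex a : Lex (Int × Int)) < toLex b)) := by
    funext a b; exact pvLexCond a b
  show (List.foldl (fun acc x => PySem.List.insertBy _ x acc) [] xs).Pairwise _
  rw [hbe]
  induction xs using List.reverseRecOn with
  | nil => simp
  | append_singleton t x ih =>
    rw [List.foldl_append]
    simp only [List.foldl_cons, List.foldl_nil]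
    exact PySem.List.insertBy_pairwise_le (fun p => (toLex p : Lex (Int × Int))) x _ ih

-- B's flag loop after the flag is set: a plain conditional set-insertion fold
theorem pvLoopTrue (m : Int × Int) (l : List (Int × Int)) (s : PySem.Set Int) :
    l.foldl
      (fun (st : Bool × PySem.Set Int) p =>
        if !st.1 && p == m then (true, st.2)
        else if p.1 > 0 then (st.1, PySem.Set.add st.2 p.1)
        else st)
      (true, s)
    = (true, l.foldl (fun s p => if p.1 > 0 then PySem.Set.add s p.1 else s) s) := by
  induction l generalizing s with
  | nil => rfl
  | cons x t ih =>
    simp only [List.foldl_cons, Bool.not_true, Bool.false_and, Bool.false_eq_true, if_false]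
    by_cases hx : x.1 > 0
    · rw [if_pos hx, if_pos hx]; exact ih _
    · rw [if_neg hx, if_neg hx]; exact ih _

-- B's flag loop before the minimum is met
theorem pvLoopFalse (m : Int × Int) (l : List (Int × Int)) (s : PySem.Set Int)
    (h : ∀ p ∈ l, p ≠ m) :
    l.foldl
      (fun (st : Bool × PySem.Set Int) p =>
        if !st.1 && p == m then (true, st.2)
        else if p.1 > 0 then (st.1, PySem.Set.add st.2 p.1)
        else st)
      (false, s)
    = (false, l.foldl (fun s p => if p.1 > 0 then PySem.Set.add s p.1 else s) s) := by
  induction l generalizing s with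
  | nil => rfl
  | cons x t ih =>
    have hx : (x == m) = false := by
      simp only [beq_eq_false_iff_ne]
      exact h x (List.mem_cons_self)
    simp only [List.foldl_cons, Bool.not_false, Bool.true_and, hx, Bool.false_eq_true, if_false]
    by_cases hp : x.1 > 0
    · rw [if_pos hp, if_pos hp]; exact ih _ (fun p hpm => h p (List.mem_cons_of_mem _ hpm))
    · rw [if_neg hp, if_neg hp]; exact ih _ (fun p hpm => h p (List.mem_cons_of_mem _ hpm))

-- the conditional set-insertion fold is set(…) of the filtered starts
theorem pvInnerFold (l : List (Int × Int)) :
    l.foldl (fun s p => if p.1 > 0 then PySem.Set.add s p.1 else s) PySem.Set.empty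
    = PySem.Set.ofList ((l.filter (fun q => decide (q.1 > 0))).map (fun q => q.1)) := by
  rw [PySem.List.foldl_ite_eq_foldl_filter (fun (p : Int × Int) => p.1 > 0)
    (fun (s : PySem.Set Int) p => PySem.Set.add s p.1) l PySem.Set.empty]
  rw [← PySem.Set.update_map_eq_foldl_add]
  exact PySem.Set.update_nil_left _

theorem boundaries_from_segments_py_eq (segs : List (Int × Int)) :
    boundaries_from_segments_py segs = boundaries_from_segments_py_alt segs := by
  by_cases hnil : segs = []
  · simp [boundaries_from_segments_py, boundaries_from_segments_py_alt, hnil]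
  -- A side: sorted2 is nonempty, name its head and tail
  have hperm2 : (PySem.List.sorted2 segs (fun x => x.1) (fun x => x.2)).Perm segs :=
    PySem.List.sorted2_perm segs _ _ false
  obtain ⟨m', rest, hsort⟩ :
      ∃ m' rest, PySem.List.sorted2 segs (fun x => x.1) (fun x => x.2) = m' :: rest := by
    cases h : PySem.List.sorted2 segs (fun x => x.1) (fun x => x.2) with
    | nil => exact absurd (List.Perm.nil_eq (h ▸ hperm2)).symm hnil
    | cons a t => exact ⟨a, t, rfl⟩
  -- B side: min2? returns some m, a lexicographic minimum
  obtain ⟨x0, t0, hx0⟩ : ∃ x0 t0, segs = x0 :: t0 := by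
    cases segs with
    | nil => exact absurd rfl hnil
    | cons a t => exact ⟨a, t, rfl⟩
  obtain ⟨m, hm, hmem0, hle0, hall0⟩ := pvMinFold t0 x0
  have hmin : PySem.List.min2? segs (fun t => t.1) (fun t => t.2) = some m := by
    rw [hx0]; exact hm
  have hmMem : m ∈ segs := by
    rw [hx0]; rcases hmem0 with h | h
    · simp [h]
    · exact List.mem_cons_of_mem _ h
  have hmMin : ∀ y ∈ segs, toLex m ≤ toLex y := by
    intro y hy; rw [hx0] at hy
    rcases List.mem_cons.mp hy with h | h
    · exact h ▸ hle0
    · exact hall0 y h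
  -- the head of sorted2 equals the minimum found by min2?
  have hm'Mem : m' ∈ segs := hperm2.mem_iff.mp (hsort ▸ List.mem_cons_self)
  have hm'Min : ∀ y ∈ segs, toLex m' ≤ toLex y := by
    intro y hy
    rcases List.mem_cons.mp ((hsort ▸ hperm2).mem_iff.mpr hy) with h | h
    · exact le_of_eq (congrArg toLex h.symm)
    · have hp := pvSorted2Pairwise segs
      rw [hsort] at hp
      exact (List.pairwise_cons.mp hp).1 y h
  have hmm : m' = m :=
    toLex_inj.mp (le_antisymm (hm'Min m hmMem) (hmMin m' hm'Mem))
  -- decompose segs at the FIRST occurrence of m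
  obtain ⟨l₁, l₂, hsegs, hnotmem⟩ := List.eq_append_cons_of_mem hmMem
  -- the tail of sorted2 is a permutation of segs with that occurrence removed
  have hrest : rest.Perm (l₁ ++ l₂) := by
    have hp3 : (m :: rest).Perm segs := by rw [← hmm, ← hsort]; exact hperm2
    have hp4 : segs.Perm (m :: (l₁ ++ l₂)) := by rw [hsegs]; exact List.perm_middle
    exact (hp3.trans hp4).cons_inv
  -- evaluate port A
  have hA : boundaries_from_segments_py segs
      = PySem.List.sorted
          (PySem.Set.ofList ((rest.filter (fun q => decide (q.1 > 0))).map (fun q => q.1)))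
          (fun x => x) := by
    unfold boundaries_from_segments_py
    rw [if_neg hnil]
    simp only [hsort, PySem.List.enumerate_cons, List.foldl_cons, beq_self_eq_true, if_true]
    rw [pvEnumFold rest (0 + 1) (by norm_num) []]
    rw [List.nil_append]
  -- evaluate port B
  have hB : boundaries_from_segments_py_alt segs
      = PySem.List.sorted
          (PySem.Set.ofList (((l₁ ++ l₂).filter (fun q => decide (q.1 > 0))).map (fun q => q.1)))
          (fun x => x) := by
    unfold boundaries_from_segments_py_alt
    rw [if_neg hnil, hmin]
    simp only
    rw [hsegs, List.foldl_append, pvLoopFalse m l₁ _ (fun p hp hpe => hnotmem (hpe ▸ hp)),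
      List.foldl_cons]
    simp only [Bool.not_false, Bool.true_and, beq_self_eq_true, if_true]
    rw [pvLoopTrue]
    simp only
    rw [← List.foldl_append, pvInnerFold]
  -- the two deduplicated start lists have the same members, hence equal sorted output
  rw [hA, hB]
  have hpf : ((rest.filter (fun q => decide (q.1 > 0))).map (fun q => q.1)).Perm
      (((l₁ ++ l₂).filter (fun q => decide (q.1 > 0))).map (fun q => q.1)) :=
    (hrest.filter _).map _
  rw [PySem.List.sorted_id_eq_sorted_id_iff_perm]
  rw [List.perm_ext_iff_of_nodup (PySem.Set.nodup_ofList _) (PySem.Set.nodup_ofList _)]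
  intro a
  rw [PySem.Set.mem_ofList, PySem.Set.mem_ofList]
  exact ⟨fun h => hpf.mem_iff.mp h, fun h => hpf.mem_iff.mpr h⟩

-- ===== VERDICT (by name: the statement is the Claim_ definition above) =====
theorem boundaries_from_segments_py_spec : Claim_equal_boundaries_from_segments_py := by
  intro segs _
  exact boundaries_from_segments_py_eq segs
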